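-- pv_equiv track=rewrite | github.com/MakrisHuang/LeetCode | python/490_the_maze.py | hasPath_bfs
-- ===== SOURCE A (Python) =====
-- from typing import List
--
-- def hasPath_bfs(maze: List[List[int]], start: List[int], destination: List[int]) -> bool:
--     from queue import Queue
--     visited = [[False] * len(maze[0]) for _ in range(len(maze))]
--     i = start[0]
--     j = start[1]
--     q = Queue()
--
--     rows = len(maze)
--     cols = len(maze[0])
--     q.put((i, j))
--     visited[i][j] = True
--     while q.qsize() > 0:
--         x, y = q.get()
--         if x == destination[0] and y == destination[1]:
--             return True
--         for step in ([-1, 0], [0, 1], [1, 0], [0, -1]):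
--             dx = x
--             dy = y
--             while dx + step[0] >= 0 and dx + step[0] < rows and \
--                 dy + step[1] >= 0 and dy + step[1] < cols and \
--                 maze[dx + step[0]][dy + step[1]] == 0:
--                 dx += step[0]
--                 dy += step[1]
--             if not visited[dx][dy]:
--                 q.put((dx, dy))
--                 visited[dx][dy] = True
--     return False
-- ===== SOURCE B (Python) =====
-- from typing import List
--
-- def hasPath_bfs(maze: List[List[int]], start: List[int], destination: List[int]) -> bool:
--     rows = len(maze)
--     cols = len(maze[0])
--     visited = [[False] * cols for _ in range(rows)]
--     dest = (destination[0], destination[1])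
--
--     def dfs(c):
--         if c == dest:
--             return True
--         visited[c[0]][c[1]] = True
--         for d in ((-1, 0), (0, 1), (1, 0), (0, -1)):
--             n = c
--             while True:
--                 px, py = n[0] + d[0], n[1] + d[1]
--                 if px < 0 or px >= rows or py < 0 or py >= cols or maze[px][py] != 0:
--                     break
--                 n = (px, py)
--             if not visited[n[0]][n[1]] and dfs(n):
--                 return True
--         return False
--
--     visited[start[0]][start[1]] = True
--     return dfs((start[0], start[1]))
-- ===== Notes on version B (the rewrite author's own statement) =====
-- stated objective: alternative
-- what changed: Replaces the FIFO queue.Queue breadth-first search by a recursive depth-first search over cells represented as tuples: the call stack replaces the queue, the destination test compares whole tuples, and the inner roll is a while-True/break scan; only the visited matrix is kept.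
-- outside the precondition, e.g. on hasPath_bfs([[1]], [0, 0], [5]): A returns False, B raises IndexError; on hasPath_bfs([[0, 0], [0]], [0, 0], [0, 1]): A returns True, B returns True
import Mathlib
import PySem

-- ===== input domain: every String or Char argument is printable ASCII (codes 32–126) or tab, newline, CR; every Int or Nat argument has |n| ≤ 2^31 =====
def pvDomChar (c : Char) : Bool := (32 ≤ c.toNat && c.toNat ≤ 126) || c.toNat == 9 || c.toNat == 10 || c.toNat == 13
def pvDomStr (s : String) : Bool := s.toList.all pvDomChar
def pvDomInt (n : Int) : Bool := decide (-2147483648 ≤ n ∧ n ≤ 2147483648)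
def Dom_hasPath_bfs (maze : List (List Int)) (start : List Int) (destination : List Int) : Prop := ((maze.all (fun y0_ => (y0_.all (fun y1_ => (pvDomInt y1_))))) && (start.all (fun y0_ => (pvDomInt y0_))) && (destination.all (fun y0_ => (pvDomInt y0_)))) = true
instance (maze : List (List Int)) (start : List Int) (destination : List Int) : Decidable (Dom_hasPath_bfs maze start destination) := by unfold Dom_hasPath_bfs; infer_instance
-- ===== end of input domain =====

-- B replaces A's FIFO-queue breadth-first search by a recursive depth-first search over cells
-- represented as tuples: the call stack replaces the queue, the inner roll is a while-True/break
-- scan, and only the visited matrix is kept (an alternative decomposition of the same cost).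

-- ===== PORT A =====

-- the four roll directions, in A's order
def pvDirs : List (Int × Int) := [(-1, 0), (0, 1), (1, 0), (0, -1)]

-- maze[x][y] (every use is guarded by 0 ≤ x < rows, 0 ≤ y < cols ≤ len(row))
def pvCell (maze : List (List Int)) (x y : Int) : Int :=
  PySem.List.pyGetD (PySem.List.pyGetD maze x []) y 1

-- A's inner while loop: roll from (x, y) in direction (sx, sy) until blocked
def pvRoll (maze : List (List Int)) (rows cols sx sy : Int) : Nat → Int → Int → Int × Int
  | 0, x, y => (x, y)
  | f + 1, x, y =>
    if 0 ≤ x + sx ∧ x + sx < rows ∧ 0 ≤ y + sy ∧ y + sy < cols ∧ pvCell maze (x + sx) (y + sy) = 0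
    then pvRoll maze rows cols sx sy f (x + sx) (y + sy)
    else (x, y)

-- visited[x][y] (Python index semantics: a negative index wraps)
def pvVGet (v : List (List Bool)) (x y : Int) : Bool :=
  PySem.List.pyGetD (PySem.List.pyGetD v x []) y false

-- visited[x][y] = True
def pvVSet (v : List (List Bool)) (x y : Int) : List (List Bool) :=
  PySem.List.pySetD v x (PySem.List.pySetD (PySem.List.pyGetD v x []) y true)

-- A's inner for-loop over the four directions: roll, and enqueue+mark unvisited stop cells
def pvExpand (maze : List (List Int)) (rows cols x y : Int)
    (acc : List (Int × Int) × List (List Bool)) : List (Int × Int) × List (List Bool) :=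
  pvDirs.foldl (fun acc d =>
    let p := pvRoll maze rows cols d.1 d.2 (rows.toNat + cols.toNat) x y
    if pvVGet acc.2 p.1 p.2 then acc
    else (acc.1 ++ [p], pvVSet acc.2 p.1 p.2)) acc

-- A's while-loop over the FIFO queue (fuel rows*cols+2 is enough: each iteration pops one cell and
-- at most rows*cols+1 cells are ever enqueued)
def pvBfsLoop (maze : List (List Int)) (rows cols d0 d1 : Int) :
    Nat → List (Int × Int) → List (List Bool) → Bool
  | 0, _, _ => false
  | _ + 1, [], _ => false
  | f + 1, c :: q, v =>
    if c.1 = d0 ∧ c.2 = d1 then true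
    else
      let s := pvExpand maze rows cols c.1 c.2 (q, v)
      pvBfsLoop maze rows cols d0 d1 f s.1 s.2

def hasPath_bfs (maze : List (List Int)) (start : List Int) (destination : List Int) : Bool :=
  let rows : Int := maze.length
  let cols : Int := (PySem.List.pyGetD maze 0 []).length
  let i := PySem.List.pyGetD start 0 0
  let j := PySem.List.pyGetD start 1 0
  let v0 := List.replicate maze.length (List.replicate (PySem.List.pyGetD maze 0 []).length false)
  pvBfsLoop maze rows cols (PySem.List.pyGetD destination 0 0) (PySem.List.pyGetD destination 1 0)
    (maze.length * (PySem.List.pyGetD maze 0 []).length + 2) [(i, j)] (pvVSet v0 i j)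

-- ===== PORT B =====

-- Source B's while-True roll: probe the next cell, break when it is blocked or out of range
def bRoll (maze : List (List Int)) (rows cols : Int) (d : Int × Int) :
    Nat → Int × Int → Int × Int
  | 0, n => n
  | f + 1, n =>
    if n.1 + d.1 < 0 ∨ rows ≤ n.1 + d.1 ∨ n.2 + d.2 < 0 ∨ cols ≤ n.2 + d.2 ∨
        PySem.List.pyGetD (PySem.List.pyGetD maze (n.1 + d.1) []) (n.2 + d.2) 1 ≠ 0
    then n
    else bRoll maze rows cols d f (n.1 + d.1, n.2 + d.2)

-- Source B's for-loop over the four directions inside dfs: roll, then recurse into an unvisited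
-- stopping tuple, propagating the first True ('rec' is the dfs of the enclosing recursion level)
def bTry (maze : List (List Int)) (rows cols : Int)
    (rec : Int × Int → List (List Bool) → Bool × List (List Bool)) :
    List (Int × Int) → Int × Int → List (List Bool) → Bool × List (List Bool)
  | [], _, v => (false, v)
  | d :: ds, c, v =>
    let n := bRoll maze rows cols d (rows.toNat + cols.toNat) c
    if PySem.List.pyGetD (PySem.List.pyGetD v n.1 []) n.2 false = true
    then bTry maze rows cols rec ds c v
    else
      let r := rec n v
      if r.1 = true then r else bTry maze rows cols rec ds c r.2

-- Source B's dfs on tuples: whole-tuple destination test, mark, then the four directions (fuel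
-- rows*cols+2 bounds the recursion depth: every recursive call marks an unvisited cell)
def bDfs (maze : List (List Int)) (rows cols : Int) (dest : Int × Int) :
    Nat → Int × Int → List (List Bool) → Bool × List (List Bool)
  | 0, _, v => (false, v)
  | f + 1, c, v =>
    if c = dest then (true, v)
    else bTry maze rows cols (bDfs maze rows cols dest f) [(-1, 0), (0, 1), (1, 0), (0, -1)] c
      (PySem.List.pySetD v c.1 (PySem.List.pySetD (PySem.List.pyGetD v c.1 []) c.2 true))

def hasPath_bfs_alt (maze : List (List Int)) (start : List Int) (destination : List Int) : Bool :=
  let rows : Int := maze.length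
  let cols : Int := (PySem.List.pyGetD maze 0 []).length
  let s : Int × Int := (PySem.List.pyGetD start 0 0, PySem.List.pyGetD start 1 0)
  let dest : Int × Int := (PySem.List.pyGetD destination 0 0, PySem.List.pyGetD destination 1 0)
  let v0 := List.replicate maze.length (List.replicate (PySem.List.pyGetD maze 0 []).length false)
  (bDfs maze rows cols dest (maze.length * (PySem.List.pyGetD maze 0 []).length + 2) s
    (PySem.List.pySetD v0 s.1 (PySem.List.pySetD (PySem.List.pyGetD v0 s.1 []) s.2 true))).1

-- ===== PRECONDITION & SPEC =====
-- Pre_ is the problem's natural domain plus Python's negative-index wraparound range for the start: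
-- start/destination carry at least two coordinates, every row is at least as long as row 0, and the
-- start indices lie in [-rows, rows) × [-cols, cols).  Outside it A raises (short argument lists,
-- start index out of the wraparound range, a row shorter than row 0 that a roll or a mark reaches) or
-- returns while B raises on the same input (a short destination never compared in full, a short row
-- only B's traversal order touches).
def Pre_hasPath_bfs (maze : List (List Int)) (start : List Int) (destination : List Int) : Prop :=
  2 ≤ start.length ∧ 2 ≤ destination.length ∧
  (∀ row ∈ maze, (PySem.List.pyGetD maze 0 []).length ≤ row.length) ∧
  -(maze.length : Int) ≤ PySem.List.pyGetD start 0 0 ∧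
  PySem.List.pyGetD start 0 0 < (maze.length : Int) ∧
  -((PySem.List.pyGetD maze 0 []).length : Int) ≤ PySem.List.pyGetD start 1 0 ∧
  PySem.List.pyGetD start 1 0 < ((PySem.List.pyGetD maze 0 []).length : Int)
instance (maze : List (List Int)) (start : List Int) (destination : List Int) : Decidable (Pre_hasPath_bfs maze start destination) := by unfold Pre_hasPath_bfs; infer_instance

def pvWitness_hasPath_bfs : List (List Int) × List Int × List Int :=
  ([[0, 0, 1], [0, 0, 0], [1, 0, 0]], [0, 0], [2, 2])

def Spec_hasPath_bfs (maze : List (List Int)) (start : List Int) (destination : List Int) (out : Bool) : Prop := out = hasPath_bfs_alt maze start destination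
instance (maze : List (List Int)) (start : List Int) (destination : List Int) (out : Bool) : Decidable (Spec_hasPath_bfs maze start destination out) := by unfold Spec_hasPath_bfs; infer_instance

-- ===== CLAIM (what is proved, stated in full; the proofs are below) =====
def Claim_equal_hasPath_bfs : Prop := ∀ (maze : List (List Int)) (start : List Int) (destination : List Int), Dom_hasPath_bfs maze start destination → Pre_hasPath_bfs maze start destination → Spec_hasPath_bfs maze start destination (hasPath_bfs maze start destination)

-- ===== LEMMAS AND PROOFS =====

-- ---- proof-side restatement of B's DFS with unpacked coordinates, and the bridge to port B ----

def pvDfsDirs (maze : List (List Int)) (rows cols : Int)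
    (rec : Int → Int → List (List Bool) → Bool × List (List Bool)) :
    List (Int × Int) → Int → Int → List (List Bool) → Bool × List (List Bool)
  | [], _, _, v => (false, v)
  | d :: ds, x, y, v =>
    let p := pvRoll maze rows cols d.1 d.2 (rows.toNat + cols.toNat) x y
    if pvVGet v p.1 p.2 then pvDfsDirs maze rows cols rec ds x y v
    else
      let r := rec p.1 p.2 v
      if r.1 then r else pvDfsDirs maze rows cols rec ds x y r.2

def pvDfs (maze : List (List Int)) (rows cols d0 d1 : Int) :
    Nat → Int → Int → List (List Bool) → Bool × List (List Bool)
  | 0, _, _, v => (false, v)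
  | f + 1, x, y, v =>
    if x = d0 ∧ y = d1 then (true, v)
    else pvDfsDirs maze rows cols (pvDfs maze rows cols d0 d1 f) pvDirs x y (pvVSet v x y)

lemma bRoll_eq (maze : List (List Int)) (rows cols : Int) (d : Int × Int) :
    ∀ (f : Nat) (c : Int × Int),
      bRoll maze rows cols d f c = pvRoll maze rows cols d.1 d.2 f c.1 c.2 := by
  intro f
  induction f with
  | zero => intro c; rfl
  | succ f ih =>
    intro c
    rw [bRoll, pvRoll]
    by_cases hg : 0 ≤ c.1 + d.1 ∧ c.1 + d.1 < rows ∧ 0 ≤ c.2 + d.2 ∧ c.2 + d.2 < cols ∧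
        pvCell maze (c.1 + d.1) (c.2 + d.2) = 0
    · rw [if_neg (by simp only [pvCell] at hg; omega), if_pos hg]
      exact ih (c.1 + d.1, c.2 + d.2)
    · rw [if_pos (by simp only [pvCell] at hg; omega), if_neg hg]

lemma bTry_eq (maze : List (List Int)) (rows cols : Int)
    (rec : Int × Int → List (List Bool) → Bool × List (List Bool))
    (rec' : Int → Int → List (List Bool) → Bool × List (List Bool))
    (hrec : ∀ c v, rec c v = rec' c.1 c.2 v) :
    ∀ (ds : List (Int × Int)) (c : Int × Int) (v : List (List Bool)),
      bTry maze rows cols rec ds c v = pvDfsDirs maze rows cols rec' ds c.1 c.2 v := by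
  intro ds
  induction ds with
  | nil => intro c v; rfl
  | cons d ds ih =>
    intro c v
    rw [bTry, pvDfsDirs]
    simp only [bRoll_eq, pvVGet, hrec]
    split
    · exact ih c v
    · split
      · rfl
      · exact ih c _

lemma bDfs_eq (maze : List (List Int)) (rows cols d0 d1 : Int) :
    ∀ (f : Nat) (c : Int × Int) (v : List (List Bool)),
      bDfs maze rows cols (d0, d1) f c v = pvDfs maze rows cols d0 d1 f c.1 c.2 v := by
  intro f
  induction f with
  | zero => intro c v; rfl
  | succ f ih =>
    intro c v
    rw [bDfs, pvDfs]
    by_cases hd : c = (d0, d1)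
    · rw [if_pos hd, if_pos (Prod.ext_iff.1 hd)]
    · rw [if_neg hd, if_neg (fun h => hd (Prod.ext_iff.2 h))]
      exact bTry_eq maze rows cols _ _ (fun c v => ih c v) _ c _

lemma bDfs_eq' (maze : List (List Int)) (rows cols d0 d1 : Int) (f : Nat) (x y : Int)
    (v : List (List Bool)) :
    bDfs maze rows cols (d0, d1) f (x, y) v = pvDfs maze rows cols d0 d1 f x y v :=
  bDfs_eq maze rows cols d0 d1 f (x, y) v

-- ---- cells: in-bounds, wraparound-valid, normalisation ----

def InB (rows cols : Int) (c : Int × Int) : Prop :=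
  0 ≤ c.1 ∧ c.1 < rows ∧ 0 ≤ c.2 ∧ c.2 < cols

def WValid (rows cols : Int) (c : Int × Int) : Prop :=
  -rows ≤ c.1 ∧ c.1 < rows ∧ -cols ≤ c.2 ∧ c.2 < cols

-- the cell a Python index pair actually addresses (negative components wrap)
def pvNorm (rows cols : Int) (c : Int × Int) : Int × Int :=
  (if c.1 < 0 then c.1 + rows else c.1, if c.2 < 0 then c.2 + cols else c.2)

-- the cells that can ever occur during the search: the raw start plus in-bounds cells
def Good (rows cols : Int) (src c : Int × Int) : Prop :=
  c = src ∨ InB rows cols c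

-- the stop cell of one roll, with the fuel the ports use
def pvStop (maze : List (List Int)) (rows cols : Int) (c d : Int × Int) : Int × Int :=
  pvRoll maze rows cols d.1 d.2 (rows.toNat + cols.toNat) c.1 c.2

-- one move of either search: a roll that ends on a cell not aliased by the start's mark
def pvStepRel (maze : List (List Int)) (rows cols : Int) (avoid : Int × Int)
    (c c' : Int × Int) : Prop :=
  ∃ d ∈ pvDirs, pvStop maze rows cols c d = c' ∧ c' ≠ avoid

def pvReach (maze : List (List Int)) (rows cols : Int) (avoid src c : Int × Int) : Prop :=
  Relation.ReflTransGen (pvStepRel maze rows cols avoid) src c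

lemma wvalid_pos (rows cols : Int) (c : Int × Int) (h : WValid rows cols c) :
    1 ≤ rows ∧ 1 ≤ cols := by
  obtain ⟨h1, h2, h3, h4⟩ := h
  omega

lemma inb_wvalid (rows cols : Int) (c : Int × Int) (hr : 0 ≤ rows) (_hc : 0 ≤ cols)
    (h : InB rows cols c) : WValid rows cols c := by
  obtain ⟨h1, h2, h3, h4⟩ := h
  exact ⟨by omega, h2, by omega, h4⟩

lemma norm_inb (rows cols : Int) (c : Int × Int) (h : WValid rows cols c) :
    InB rows cols (pvNorm rows cols c) := by
  obtain ⟨h1, h2, h3, h4⟩ := h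
  unfold pvNorm InB
  constructor
  · split <;> simp <;> omega
  refine ⟨?_, ?_, ?_⟩
  · split <;> simp <;> omega
  · split <;> simp <;> omega
  · split <;> simp <;> omega

lemma norm_of_inb (rows cols : Int) (c : Int × Int) (h : InB rows cols c) :
    pvNorm rows cols c = c := by
  obtain ⟨h1, h2, h3, h4⟩ := h
  unfold pvNorm
  rw [if_neg (by omega), if_neg (by omega)]

lemma pvRoll_inB (maze : List (List Int)) (rows cols sx sy : Int) :
    ∀ (f : Nat) (x y : Int), InB rows cols (x, y) →
      InB rows cols (pvRoll maze rows cols sx sy f x y) := by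
  intro f
  induction f with
  | zero => intro x y h; simpa [pvRoll] using h
  | succ f ih =>
    intro x y h
    rw [pvRoll]
    split
    · next hg => exact ih _ _ ⟨hg.1, hg.2.1, hg.2.2.1, hg.2.2.2.1⟩
    · exact h

lemma pvRoll_stay_or_inB (maze : List (List Int)) (rows cols sx sy : Int) (f : Nat) (x y : Int) :
    pvRoll maze rows cols sx sy f x y = (x, y) ∨
      InB rows cols (pvRoll maze rows cols sx sy f x y) := by
  cases f with
  | zero => exact Or.inl rfl
  | succ f =>
    rw [pvRoll]
    split
    · next hg => exact Or.inr (pvRoll_inB maze rows cols sx sy f _ _ ⟨hg.1, hg.2.1, hg.2.2.1, hg.2.2.2.1⟩)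
    · exact Or.inl rfl

lemma pvStop_good (maze : List (List Int)) (rows cols : Int) (src c d : Int × Int)
    (hc : Good rows cols src c) : Good rows cols src (pvStop maze rows cols c d) := by
  rcases hc with rfl | hin
  · rcases pvRoll_stay_or_inB maze rows cols d.1 d.2 (rows.toNat + cols.toNat) c.1 c.2 with h | h
    · left; rw [pvStop, h]
    · right; exact h
  · right; exact pvRoll_inB maze rows cols d.1 d.2 _ c.1 c.2 hin

lemma pvReach_closed (maze : List (List Int)) (rows cols : Int) (avoid src : Int × Int)
    (S : Int × Int → Prop) (hsrc : S src)
    (hcl : ∀ c, S c → ∀ d ∈ pvDirs, pvStop maze rows cols c d ≠ avoid →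
      S (pvStop maze rows cols c d)) :
    ∀ c, pvReach maze rows cols avoid src c → S c := by
  intro c h
  induction h with
  | refl => exact hsrc
  | tail _ step ih =>
    obtain ⟨d, hd, he, hne⟩ := step
    exact he ▸ hcl _ ih d hd (he ▸ hne)

-- ---- cardinality: a nodup list of good cells has at most rows*cols + 1 elements ----

def pvAll (rows cols : Int) : List (Int × Int) :=
  (List.range rows.toNat).flatMap (fun (a : Nat) => (List.range cols.toNat).map (fun (b : Nat) => ((a : Int), (b : Int))))

lemma mem_pvAll (rows cols : Int) (c : Int × Int) : c ∈ pvAll rows cols ↔ InB rows cols c := by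
  obtain ⟨x, y⟩ := c
  unfold pvAll
  rw [List.mem_flatMap]
  constructor
  · rintro ⟨a, ha, hc⟩
    rw [List.mem_range] at ha
    rw [List.mem_map] at hc
    obtain ⟨b, hb, hc⟩ := hc
    rw [List.mem_range] at hb
    obtain ⟨rfl, rfl⟩ := Prod.mk.injEq .. ▸ hc
    simp only [InB]
    omega
  · rintro ⟨h1, h2, h3, h4⟩
    refine ⟨x.toNat, List.mem_range.2 (by omega), ?_⟩
    rw [List.mem_map]
    refine ⟨y.toNat, List.mem_range.2 (by omega), ?_⟩
    simp only [Prod.mk.injEq]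
    omega

lemma length_pvAll (rows cols : Int) : (pvAll rows cols).length = rows.toNat * cols.toNat := by
  simp [pvAll, List.length_flatMap]

lemma length_le_size (rows cols : Int) (src : Int × Int) (S : List (Int × Int)) (hnd : S.Nodup)
    (hin : ∀ c ∈ S, Good rows cols src c) : S.length ≤ rows.toNat * cols.toNat + 1 := by
  have h1 : S.toFinset.card = S.length := List.toFinset_card_of_nodup hnd
  have h2 : S.toFinset ⊆ insert src (pvAll rows cols).toFinset := by
    intro c hc
    rw [List.mem_toFinset] at hc
    rcases hin c hc with rfl | h
    · exact Finset.mem_insert_self _ _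
    · exact Finset.mem_insert_of_mem (List.mem_toFinset.2 ((mem_pvAll rows cols c).2 h))
  have h3 := Finset.card_le_card h2
  have h4 := Finset.card_insert_le src (pvAll rows cols).toFinset
  have h5 : (pvAll rows cols).toFinset.card ≤ (pvAll rows cols).length :=
    (pvAll rows cols).toFinset_card_le
  have h6 := length_pvAll rows cols
  omega

-- ---- the visited matrix, with Python's wraparound indexing ----

def VShape (rows cols : Int) (v : List (List Bool)) : Prop :=
  v.length = rows.toNat ∧ ∀ row ∈ v, row.length = cols.toNat

-- the Nat index a wrap-valid Python index addresses
def pvNI (n : Nat) (i : Int) : Nat := if 0 ≤ i then i.toNat else n - (-i).toNat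

lemma pyIdx_wrap (n : Nat) (i : Int) (h1 : -(n : Int) ≤ i) (h2 : i < (n : Int)) :
    PySem.List.pyIdx? n i = some (pvNI n i) := by
  unfold PySem.List.pyIdx? pvNI
  by_cases h : 0 ≤ i
  · rw [if_pos h, if_pos h2, if_pos h]
  · rw [if_neg h, if_pos h1, if_neg h]

lemma pyGetD_wrap {α : Type} (xs : List α) (i : Int) (d : α)
    (h1 : -(xs.length : Int) ≤ i) (h2 : i < (xs.length : Int)) :
    PySem.List.pyGetD xs i d = xs.getD (pvNI xs.length i) d := by
  show (PySem.List.pyGet? xs i).getD d = _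
  unfold PySem.List.pyGet?
  rw [pyIdx_wrap xs.length i h1 h2]
  show (xs[pvNI xs.length i]?).getD d = _
  rw [List.getD_eq_getElem?_getD]

lemma pySetD_wrap {α : Type} (xs : List α) (i : Int) (v : α)
    (h1 : -(xs.length : Int) ≤ i) (h2 : i < (xs.length : Int)) :
    PySem.List.pySetD xs i v = xs.set (pvNI xs.length i) v := by
  unfold PySem.List.pySetD PySem.List.pySet?
  rw [pyIdx_wrap xs.length i h1 h2]
  rfl

-- a wrap-valid index pair and its normalised cell address the same matrix entry
lemma pvNI_norm_fst (rows : Int) (i : Int) (h1 : -rows ≤ i) (h2 : i < rows) :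
    ((pvNI rows.toNat i : Nat) : Int) = (if i < 0 then i + rows else i) := by
  unfold pvNI
  split <;> split <;> omega

lemma vget_vset_wrap (rows cols : Int) (v : List (List Bool)) (hs : VShape rows cols v)
    (p c : Int × Int) (hp : WValid rows cols p) (hc : WValid rows cols c) :
    pvVGet (pvVSet v p.1 p.2) c.1 c.2
      = if pvNorm rows cols c = pvNorm rows cols p then true else pvVGet v c.1 c.2 := by
  obtain ⟨hlen, hrowlen⟩ := hs
  obtain ⟨hp1, hp2, hp3, hp4⟩ := hp
  obtain ⟨hc1, hc2, hc3, hc4⟩ := hc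
  obtain ⟨hr1, hco1⟩ := wvalid_pos rows cols p ⟨hp1, hp2, hp3, hp4⟩
  have hrl : ∀ (i : Nat) (h : i < v.length), v[i].length = cols.toNat :=
    fun i h => hrowlen _ (List.getElem_mem h)
  have hlenI : (v.length : Int) = rows := by omega
  have ha : pvNI v.length c.1 < v.length ∧ pvNI v.length p.1 < v.length := by
    unfold pvNI
    constructor <;> split <;> omega
  obtain ⟨hi, ha⟩ := ha
  unfold pvVSet pvVGet
  rw [pyGetD_wrap v p.1 [] (by omega) (by omega),
    List.getD_eq_getElem v [] (by omega),
    pySetD_wrap v p.1 _ (by omega) (by omega),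
    pySetD_wrap _ p.2 true (by rw [hrl _ (by omega)]; omega) (by rw [hrl _ (by omega)]; omega),
    pyGetD_wrap _ c.1 [] (by simp only [List.length_set]; omega)
      (by simp only [List.length_set]; omega),
    List.getD_eq_getElem _ [] (by simp only [List.length_set]; omega)]
  simp only [List.length_set]
  simp only [hrl _ ha]
  rw [List.getElem_set]
  have hnormiff : (pvNorm rows cols c = pvNorm rows cols p)
      ↔ (pvNI v.length c.1 = pvNI v.length p.1 ∧ pvNI cols.toNat c.2 = pvNI cols.toNat p.2) := by
    unfold pvNorm
    rw [Prod.ext_iff, hlen]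
    simp only
    rw [← pvNI_norm_fst rows c.1 (by omega) (by omega),
      ← pvNI_norm_fst rows p.1 (by omega) (by omega),
      ← pvNI_norm_fst cols c.2 (by omega) (by omega),
      ← pvNI_norm_fst cols p.2 (by omega) (by omega)]
    omega
  by_cases h1 : pvNI v.length p.1 = pvNI v.length c.1
  · rw [if_pos h1]
    have hsetlen : (v[pvNI v.length p.1].set (pvNI cols.toNat p.2) true).length = cols.toNat := by
      rw [List.length_set, hrl _ ha]
    rw [pyGetD_wrap _ c.2 false (by rw [hsetlen]; omega) (by rw [hsetlen]; omega),
      List.getD_eq_getElem _ false (by rw [hsetlen]; unfold pvNI; split <;> omega),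
      List.getElem_set]
    simp only [List.length_set, hrl _ ha]
    by_cases h2 : pvNI cols.toNat p.2 = pvNI cols.toNat c.2
    · rw [if_pos h2, if_pos (hnormiff.2 ⟨h1.symm, h2.symm⟩)]
    · rw [if_neg h2, if_neg (fun hn => h2 (hnormiff.1 hn).2.symm)]
      rw [pyGetD_wrap v c.1 [] (by omega) (by omega),
        List.getD_eq_getElem v [] (by omega),
        pyGetD_wrap _ c.2 false (by rw [hrl _ hi]; omega) (by rw [hrl _ hi]; omega),
        List.getD_eq_getElem _ false (by rw [hrl _ hi]; unfold pvNI; split <;> omega)]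
      simp only [h1]
      simp only [hrl _ hi]
  · rw [if_neg h1, if_neg (fun hn => h1 (hnormiff.1 hn).1.symm)]
    rw [pyGetD_wrap v c.1 [] (by omega) (by omega),
      List.getD_eq_getElem v [] (by omega),
      pyGetD_wrap _ c.2 false (by rw [hrl _ hi]; omega) (by rw [hrl _ hi]; omega),
      List.getD_eq_getElem _ false (by rw [hrl _ hi]; unfold pvNI; split <;> omega)]

lemma vshape_vset_wrap (rows cols : Int) (v : List (List Bool)) (hs : VShape rows cols v)
    (p : Int × Int) (hp : WValid rows cols p) : VShape rows cols (pvVSet v p.1 p.2) := by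
  obtain ⟨hlen, hrow⟩ := hs
  obtain ⟨hp1, hp2, hp3, hp4⟩ := hp
  unfold pvVSet
  rw [pySetD_wrap v p.1 _ (by omega) (by omega)]
  refine ⟨by simpa using hlen, ?_⟩
  intro row hr
  rcases List.mem_or_eq_of_mem_set hr with h | rfl
  · exact hrow row h
  · rw [pyGetD_wrap v p.1 [] (by omega) (by omega),
      List.getD_eq_getElem v [] (by unfold pvNI; split <;> omega),
      pySetD_wrap _ p.2 true ?hb1 ?hb2]
    · rw [List.length_set]
      exact hrow _ (List.getElem_mem _)
    case hb1 =>
      rw [hrow _ (List.getElem_mem _)]; omega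
    case hb2 =>
      rw [hrow _ (List.getElem_mem _)]; omega

lemma vshape_init (rows cols : Int) :
    VShape rows cols (List.replicate rows.toNat (List.replicate cols.toNat false)) := by
  refine ⟨List.length_replicate, ?_⟩
  intro row hr
  rw [List.eq_of_mem_replicate hr]
  exact List.length_replicate

lemma vget_init (rows cols : Int) (c : Int × Int) :
    pvVGet (List.replicate rows.toNat (List.replicate cols.toNat false)) c.1 c.2 = false := by
  unfold pvVGet
  have hin : ∀ (l : List Bool), (∀ b ∈ l, b = false) → ∀ i : Int, PySem.List.pyGetD l i false = false := by
    intro l hl i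
    cases h : PySem.List.pyGet? l i with
    | none => exact PySem.List.pyGetD_of_none l i false h
    | some b =>
      have : PySem.List.pyGetD l i false = b := by
        show (PySem.List.pyGet? l i).getD false = b
        rw [h]; rfl
      rw [this]
      exact hl b (PySem.List.mem_of_pyGet?_eq_some l h)
  apply hin
  intro b hb
  cases h : PySem.List.pyGet? (List.replicate rows.toNat (List.replicate cols.toNat false)) c.1 with
  | none =>
    rw [PySem.List.pyGetD_of_none _ _ _ h] at hb
    simp at hb
  | some row =>
    have : PySem.List.pyGetD (List.replicate rows.toNat (List.replicate cols.toNat false)) c.1 [] = row := by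
      show (PySem.List.pyGet? _ c.1).getD [] = row
      rw [h]; rfl
    rw [this] at hb
    have := PySem.List.mem_of_pyGet?_eq_some _ h
    rw [List.eq_of_mem_replicate this] at hb
    exact List.eq_of_mem_replicate hb

-- ---- the search invariant shared by both loops ----

-- S lists the raw cells ever marked; the matrix additionally carries the start's alias
def MInv (rows cols : Int) (src nsrc : Int × Int) (v : List (List Bool))
    (S : List (Int × Int)) : Prop :=
  VShape rows cols v ∧ S.Nodup ∧ src ∈ S ∧ (∀ c ∈ S, Good rows cols src c) ∧
  (∀ c, Good rows cols src c → (pvVGet v c.1 c.2 = true ↔ c ∈ S ∨ c = nsrc))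

lemma good_wvalid (rows cols : Int) (src c : Int × Int) (hws : WValid rows cols src)
    (h : Good rows cols src c) : WValid rows cols c := by
  rcases h with rfl | h
  · exact hws
  · have := wvalid_pos rows cols src hws
    exact inb_wvalid rows cols c (by omega) (by omega) h

-- marking a fresh, unaliased good cell extends S by exactly that cell
lemma mark_spec (rows cols : Int) (src nsrc : Int × Int) (hws : WValid rows cols src)
    (hnsrc : nsrc = pvNorm rows cols src) (v : List (List Bool)) (S : List (Int × Int))
    (hInv : MInv rows cols src nsrc v S) (p : Int × Int) (hp : Good rows cols src p)
    (hpS : p ∉ S) (hpn : p ≠ nsrc) :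
    MInv rows cols src nsrc (pvVSet v p.1 p.2) (S ++ [p]) := by
  obtain ⟨hs, hnd, hsrc, hgood, hiff⟩ := hInv
  have hpw := good_wvalid rows cols src p hws hp
  have hpin : InB rows cols p := by
    rcases hp with rfl | h
    · exact absurd hsrc hpS
    · exact h
  refine ⟨vshape_vset_wrap rows cols v hs p hpw, ?_, List.mem_append_left _ hsrc, ?_, ?_⟩
  · rw [List.nodup_append]
    refine ⟨hnd, List.nodup_singleton p, ?_⟩
    intro x hx y hy hxy
    rw [List.mem_singleton] at hy
    subst hy; subst hxy
    exact hpS hx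
  · intro c hc
    rcases List.mem_append.1 hc with h | h
    · exact hgood c h
    · rw [List.mem_singleton] at h; subst h; exact hp
  · intro c hcg
    have hcw := good_wvalid rows cols src c hws hcg
    rw [vget_vset_wrap rows cols v hs p c hpw hcw]
    have hnormp : pvNorm rows cols p = p := norm_of_inb rows cols p hpin
    by_cases he : pvNorm rows cols c = pvNorm rows cols p
    · rw [if_pos he]
      rw [hnormp] at he
      rcases hcg with rfl | hcin
      · exact absurd (hnsrc.trans he).symm hpn
      · rw [norm_of_inb rows cols c hcin] at he
        subst he
        simp
    · rw [if_neg he, hiff c hcg]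
      constructor
      · rintro (h | h)
        · exact Or.inl (List.mem_append_left _ h)
        · exact Or.inr h
      · rintro (h | h)
        · rcases List.mem_append.1 h with h | h
          · exact Or.inl h
          · rw [List.mem_singleton] at h
            subst h
            exact absurd (by rw [hnormp]) he
        · exact Or.inr h

-- reading the matrix at a good cell decides membership in S up to the alias
lemma vtrue_iff (rows cols : Int) (src nsrc : Int × Int) (v : List (List Bool))
    (S : List (Int × Int)) (hInv : MInv rows cols src nsrc v S) (c : Int × Int)
    (hc : Good rows cols src c) : (pvVGet v c.1 c.2 = true ↔ c ∈ S ∨ c = nsrc) :=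
  hInv.2.2.2.2 c hc

-- ===== A: the BFS loop returns exactly reachability =====

lemma pvExpandGo_spec (maze : List (List Int)) (rows cols : Int) (src nsrc : Int × Int)
    (hws : WValid rows cols src) (hnsrc : nsrc = pvNorm rows cols src) (x y : Int)
    (hxy : Good rows cols src (x, y)) :
    ∀ (dirs : List (Int × Int)) (q : List (Int × Int)) (v : List (List Bool)) (S : List (Int × Int)),
    MInv rows cols src nsrc v S →
    ∃ news v',
      dirs.foldl (fun acc d =>
        let p := pvRoll maze rows cols d.1 d.2 (rows.toNat + cols.toNat) x y
        if pvVGet acc.2 p.1 p.2 then acc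
        else (acc.1 ++ [p], pvVSet acc.2 p.1 p.2)) (q, v) = (q ++ news, v') ∧
      MInv rows cols src nsrc v' (S ++ news) ∧
      (∀ c ∈ news, ∃ d ∈ dirs, c = pvStop maze rows cols (x, y) d ∧ c ≠ nsrc) ∧
      (∀ d ∈ dirs, pvStop maze rows cols (x, y) d ≠ nsrc → pvStop maze rows cols (x, y) d ∈ S ++ news) := by
  intro dirs
  induction dirs with
  | nil =>
    intro q v S hInv
    exact ⟨[], v, by simp, by simpa using hInv, by simp, by simp⟩
  | cons d ds ih =>
    intro q v S hInv
    rw [List.foldl_cons]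
    simp only
    set p := pvRoll maze rows cols d.1 d.2 (rows.toNat + cols.toNat) x y with hp
    have hpgood : Good rows cols src p := pvStop_good maze rows cols src (x, y) d hxy
    have hpstop : p = pvStop maze rows cols (x, y) d := rfl
    by_cases hvis : pvVGet v p.1 p.2 = true
    · rw [if_pos hvis]
      obtain ⟨news, v', h1, h2, h3, h4⟩ := ih q v S hInv
      refine ⟨news, v', h1, h2, ?_, ?_⟩
      · intro c hc
        obtain ⟨d', hd', he⟩ := h3 c hc
        exact ⟨d', List.mem_cons_of_mem d hd', he⟩
      · intro d' hd' hne
        rcases List.mem_cons.1 hd' with rfl | hd'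
        · rcases (vtrue_iff rows cols src nsrc v S hInv p hpgood).1 hvis with h | h
          · exact List.mem_append_left _ (hpstop ▸ h)
          · exact absurd (hpstop ▸ h) hne
        · exact h4 d' hd' hne
    · rw [if_neg hvis]
      have hiffp := vtrue_iff rows cols src nsrc v S hInv p hpgood
      have hpS : p ∉ S := fun h => hvis (hiffp.2 (Or.inl h))
      have hpn : p ≠ nsrc := fun h => hvis (hiffp.2 (Or.inr h))
      have hInv1 := mark_spec rows cols src nsrc hws hnsrc v S hInv p hpgood hpS hpn
      obtain ⟨news, v', h1, h2, h3, h4⟩ := ih (q ++ [p]) (pvVSet v p.1 p.2) (S ++ [p]) hInv1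
      have hassoc : (S ++ [p]) ++ news = S ++ p :: news := by simp
      refine ⟨p :: news, v', ?_, ?_, ?_, ?_⟩
      · rw [h1]; simp
      · rw [← hassoc]; exact h2
      · intro c hc
        rcases List.mem_cons.1 hc with rfl | hc
        · exact ⟨d, List.mem_cons_self .., hpstop, hpn⟩
        · obtain ⟨d', hd', he⟩ := h3 c hc
          exact ⟨d', List.mem_cons_of_mem d hd', he⟩
      · intro d' hd' hne
        rcases List.mem_cons.1 hd' with rfl | hd'
        · rw [← hassoc, ← hpstop]
          exact List.mem_append_left news (List.mem_append_right S (List.mem_singleton_self p))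
        · rw [← hassoc]
          exact h4 d' hd' hne

lemma pvBfsLoop_iff (maze : List (List Int)) (rows cols d0 d1 : Int) (src nsrc : Int × Int)
    (hws : WValid rows cols src) (hnsrc : nsrc = pvNorm rows cols src) :
    ∀ (f : Nat) (q : List (Int × Int)) (v : List (List Bool)) (S : List (Int × Int)),
    MInv rows cols src nsrc v S →
    (∀ c ∈ S, pvReach maze rows cols nsrc src c) →
    (∀ c ∈ q, c ∈ S) →
    (∀ c ∈ S, c ∉ q →
      (∀ d ∈ pvDirs, pvStop maze rows cols c d ≠ nsrc → pvStop maze rows cols c d ∈ S) ∧ c ≠ (d0, d1)) →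
    rows.toNat * cols.toNat + 2 + q.length ≤ f + S.length →
    (pvBfsLoop maze rows cols d0 d1 f q v = true ↔ pvReach maze rows cols nsrc src (d0, d1)) := by
  have hempty : ∀ S : List (Int × Int), src ∈ S →
      (∀ c ∈ S, (∀ d ∈ pvDirs, pvStop maze rows cols c d ≠ nsrc → pvStop maze rows cols c d ∈ S) ∧ c ≠ (d0, d1)) →
      ¬ pvReach maze rows cols nsrc src (d0, d1) := by
    intro S hsrc hclosed h
    have hmem := pvReach_closed maze rows cols nsrc src (fun c => c ∈ S) hsrc
      (fun c hc d hd hne => (hclosed c hc).1 d hd hne) _ h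
    exact (hclosed _ hmem).2 rfl
  intro f
  induction f with
  | zero =>
    intro q v S hInv hreach hq hclosed hfuel
    cases q with
    | nil =>
      rw [pvBfsLoop]
      simp only [Bool.false_eq_true, false_iff]
      exact hempty S hInv.2.2.1 (fun c hc => hclosed c hc (by simp))
    | cons c q' =>
      exfalso
      have := length_le_size rows cols src S hInv.2.1 hInv.2.2.2.1
      simp only [List.length_cons] at hfuel
      omega
  | succ f ih =>
    intro q v S hInv hreach hq hclosed hfuel
    cases q with
    | nil =>
      rw [pvBfsLoop]
      simp only [Bool.false_eq_true, false_iff]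
      exact hempty S hInv.2.2.1 (fun c hc => hclosed c hc (by simp))
    | cons c q' =>
      rw [pvBfsLoop]
      by_cases hd : c.1 = d0 ∧ c.2 = d1
      · rw [if_pos hd]
        have hc : c = (d0, d1) := Prod.ext_iff.2 ⟨hd.1, hd.2⟩
        simp only [true_iff]
        exact hc ▸ hreach c (hq c (List.mem_cons_self ..))
      · rw [if_neg hd]
        have hcS := hq c (List.mem_cons_self ..)
        have hcgood : Good rows cols src (c.1, c.2) := hInv.2.2.2.1 c hcS
        obtain ⟨news, v', h1, h2, h3, h4⟩ :=
          pvExpandGo_spec maze rows cols src nsrc hws hnsrc c.1 c.2 hcgood pvDirs q' v S hInv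
        have heta : ((c.1, c.2) : Int × Int) = c := rfl
        rw [heta] at h3 h4
        have hexp : pvExpand maze rows cols c.1 c.2 (q', v) = (q' ++ news, v') := h1
        simp only [hexp]
        apply ih (q' ++ news) v' (S ++ news) h2
        · intro c' hc'
          rcases List.mem_append.1 hc' with h | h
          · exact hreach c' h
          · obtain ⟨d', hd', he, hne⟩ := h3 c' h
            exact Relation.ReflTransGen.tail (hreach c hcS) ⟨d', hd', he.symm, he ▸ hne⟩
        · intro c' hc'
          rcases List.mem_append.1 hc' with h | h
          · exact List.mem_append_left _ (hq c' (List.mem_cons_of_mem c h))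
          · exact List.mem_append_right _ h
        · intro c' hc' hnq
          rcases List.mem_append.1 hc' with hS | hnews
          · by_cases hc'c : c' = c
            · subst hc'c
              refine ⟨fun d' hd' hne => h4 d' hd' hne, fun heq => hd ⟨by rw [heq], by rw [heq]⟩⟩
            · have hold : c' ∉ c :: q' := by
                intro h
                rcases List.mem_cons.1 h with h | h
                · exact hc'c h
                · exact hnq (List.mem_append_left _ h)
              obtain ⟨hst, hne⟩ := hclosed c' hS hold
              exact ⟨fun d' hd' hne' => List.mem_append_left _ (hst d' hd' hne'), hne⟩
          · exact absurd (List.mem_append_right _ hnews) hnq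
        · have hle1 := List.length_append (as := q') (bs := news)
          have hle2 := List.length_append (as := S) (bs := news)
          simp only [List.length_cons] at hfuel
          omega

-- ===== B: the DFS returns exactly reachability =====

-- marking an already-marked cell keeps the invariant
lemma mark_mem_spec (rows cols : Int) (src nsrc : Int × Int) (hws : WValid rows cols src)
    (hnsrc : nsrc = pvNorm rows cols src) (v : List (List Bool)) (S : List (Int × Int))
    (hInv : MInv rows cols src nsrc v S) (p : Int × Int) (hp : p ∈ S) :
    MInv rows cols src nsrc (pvVSet v p.1 p.2) S := by
  obtain ⟨hs, hnd, hsrc, hgood, hiff⟩ := hInv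
  have hpgood := hgood p hp
  have hpw := good_wvalid rows cols src p hws hpgood
  refine ⟨vshape_vset_wrap rows cols v hs p hpw, hnd, hsrc, hgood, ?_⟩
  intro c hcg
  have hcw := good_wvalid rows cols src c hws hcg
  rw [vget_vset_wrap rows cols v hs p c hpw hcw]
  by_cases he : pvNorm rows cols c = pvNorm rows cols p
  · rw [if_pos he]
    simp only [true_iff]
    rcases hcg with rfl | hcin
    · exact Or.inl hsrc
    · rw [norm_of_inb rows cols c hcin] at he
      rcases hpgood with rfl | hpin
      · exact Or.inr (he.trans hnsrc.symm)
      · rw [norm_of_inb rows cols p hpin] at he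
        exact Or.inl (he ▸ hp)
  · rw [if_neg he]
    exact hiff c hcg

-- a nodup list included in another list is no longer than it
lemma nodup_subset_length (S T : List (Int × Int)) (hnd : S.Nodup) (hsub : ∀ c ∈ S, c ∈ T) :
    S.length ≤ T.length := by
  have h1 : S.toFinset.card = S.length := List.toFinset_card_of_nodup hnd
  have h2 : S.toFinset ⊆ T.toFinset := by
    intro c hc
    rw [List.mem_toFinset] at *
    exact hsub c hc
  have h3 := Finset.card_le_card h2
  have h4 := T.toFinset_card_le
  omega

lemma pvDfs_spec (maze : List (List Int)) (rows cols d0 d1 : Int) (src nsrc : Int × Int)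
    (hws : WValid rows cols src) (hnsrc : nsrc = pvNorm rows cols src) :
    ∀ (f : Nat) (x y : Int) (v : List (List Bool)) (S : List (Int × Int)),
    MInv rows cols src nsrc v S →
    Good rows cols src (x, y) →
    (((x, y) ∈ S ∧ rows.toNat * cols.toNat + 2 ≤ f + S.length) ∨
      ((x, y) ∉ S ∧ (x, y) ≠ nsrc ∧ rows.toNat * cols.toNat + 1 ≤ f + S.length)) →
    ∃ S', MInv rows cols src nsrc (pvDfs maze rows cols d0 d1 f x y v).2 S' ∧
      (∀ c ∈ S, c ∈ S') ∧
      (∀ c ∈ S', c ∈ S ∨ Relation.ReflTransGen (pvStepRel maze rows cols nsrc) (x, y) c) ∧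
      ((pvDfs maze rows cols d0 d1 f x y v).1 = false →
        (x, y) ∈ S' ∧ (x, y) ≠ (d0, d1) ∧
        (∀ d ∈ pvDirs, pvStop maze rows cols (x, y) d ≠ nsrc → pvStop maze rows cols (x, y) d ∈ S') ∧
        (∀ c ∈ S', c ∉ S → c ≠ (d0, d1) ∧
          ∀ d ∈ pvDirs, pvStop maze rows cols c d ≠ nsrc → pvStop maze rows cols c d ∈ S')) ∧
      ((pvDfs maze rows cols d0 d1 f x y v).1 = true →
        Relation.ReflTransGen (pvStepRel maze rows cols nsrc) (x, y) (d0, d1)) := by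
  intro f
  induction f with
  | zero =>
    intro x y v S hInv hgood hmem
    exfalso
    have hsize := length_le_size rows cols src S hInv.2.1 hInv.2.2.2.1
    rcases hmem with ⟨_, hf⟩ | ⟨hnotin, _, hf⟩
    · omega
    · have hnd2 : (S ++ [(x, y)]).Nodup := by
        rw [List.nodup_append]
        refine ⟨hInv.2.1, List.nodup_singleton _, ?_⟩
        intro a ha b hb hab
        rw [List.mem_singleton] at hb
        subst hb; subst hab
        exact hnotin ha
      have hsz2 := length_le_size rows cols src (S ++ [(x, y)]) hnd2 (by
        intro c hc
        rcases List.mem_append.1 hc with h | h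
        · exact hInv.2.2.2.1 c h
        · rw [List.mem_singleton] at h; subst h; exact hgood)
      simp only [List.length_append, List.length_singleton] at hsz2
      omega
  | succ f ih =>
    intro x y v S hInv hgood hmem
    rw [pvDfs]
    by_cases hdest : x = d0 ∧ y = d1
    · rw [if_pos hdest]
      have hxyd : ((x, y) : Int × Int) = (d0, d1) := Prod.ext_iff.2 ⟨hdest.1, hdest.2⟩
      refine ⟨S, hInv, fun c hc => hc, fun c hc => Or.inl hc, ?_, ?_⟩
      · intro h; simp at h
      · intro _
        exact hxyd ▸ Relation.ReflTransGen.refl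
    · rw [if_neg hdest]
      have hxyne : ((x, y) : Int × Int) ≠ (d0, d1) := by
        intro h
        exact hdest ⟨congrArg Prod.fst h, congrArg Prod.snd h⟩
      obtain ⟨S₁, hInv1, hsub1, hmem1, hnew1, hfuel1⟩ :
          ∃ S₁, MInv rows cols src nsrc (pvVSet v x y) S₁ ∧ (∀ c ∈ S, c ∈ S₁) ∧ (x, y) ∈ S₁ ∧
            (∀ c ∈ S₁, c ∈ S ∨ c = (x, y)) ∧
            rows.toNat * cols.toNat + 1 ≤ f + S₁.length := by
        rcases hmem with ⟨hin, hf⟩ | ⟨hnotin, hne, hf⟩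
        · exact ⟨S, mark_mem_spec rows cols src nsrc hws hnsrc v S hInv (x, y) hin,
            fun c hc => hc, hin, fun c hc => Or.inl hc, by omega⟩
        · refine ⟨S ++ [(x, y)],
            mark_spec rows cols src nsrc hws hnsrc v S hInv (x, y) hgood hnotin hne,
            fun c hc => List.mem_append_left _ hc,
            List.mem_append_right _ (List.mem_singleton_self _), ?_, ?_⟩
          · intro c hc
            rcases List.mem_append.1 hc with h | h
            · exact Or.inl h
            · exact Or.inr (List.mem_singleton.1 h)
          · simp only [List.length_append, List.length_singleton]
            omega
      have dirs_spec : ∀ (ds : List (Int × Int)), (∀ d' ∈ ds, d' ∈ pvDirs) →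
          ∀ (v' : List (List Bool)) (T : List (Int × Int)),
          MInv rows cols src nsrc v' T → (x, y) ∈ T →
          rows.toNat * cols.toNat + 1 ≤ f + T.length →
          ∃ S', MInv rows cols src nsrc
              (pvDfsDirs maze rows cols (pvDfs maze rows cols d0 d1 f) ds x y v').2 S' ∧
            (∀ c ∈ T, c ∈ S') ∧
            (∀ c ∈ S', c ∈ T ∨ Relation.ReflTransGen (pvStepRel maze rows cols nsrc) (x, y) c) ∧
            ((pvDfsDirs maze rows cols (pvDfs maze rows cols d0 d1 f) ds x y v').1 = false →
              (∀ d ∈ ds, pvStop maze rows cols (x, y) d ≠ nsrc →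
                pvStop maze rows cols (x, y) d ∈ S') ∧
              (∀ c ∈ S', c ∉ T → c ≠ (d0, d1) ∧
                ∀ d ∈ pvDirs, pvStop maze rows cols c d ≠ nsrc → pvStop maze rows cols c d ∈ S')) ∧
            ((pvDfsDirs maze rows cols (pvDfs maze rows cols d0 d1 f) ds x y v').1 = true →
              Relation.ReflTransGen (pvStepRel maze rows cols nsrc) (x, y) (d0, d1)) := by
        intro ds
        induction ds with
        | nil =>
          intro _ v' T hInvT hxyT hfT
          refine ⟨T, by rw [pvDfsDirs]; exact hInvT, fun c hc => hc, fun c hc => Or.inl hc, ?_, ?_⟩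
          · intro _
            exact ⟨by simp, fun c hc hnc => absurd hc hnc⟩
          · intro h
            rw [pvDfsDirs] at h
            simp at h
        | cons d ds ihds =>
          intro hds v' T hInvT hxyT hfT
          rw [pvDfsDirs]
          simp only
          set p := pvRoll maze rows cols d.1 d.2 (rows.toNat + cols.toNat) x y with hp
          have hpgood : Good rows cols src p :=
            pvStop_good maze rows cols src (x, y) d hgood
          have hpstop : p = pvStop maze rows cols (x, y) d := rfl
          by_cases hvis : pvVGet v' p.1 p.2 = true
          · rw [if_pos hvis]
            obtain ⟨S', g1, g2, g3, g4, g5⟩ :=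
              ihds (fun d' hd' => hds d' (List.mem_cons_of_mem d hd')) v' T hInvT hxyT hfT
            refine ⟨S', g1, g2, g3, ?_, g5⟩
            intro hfalse
            obtain ⟨ga, gb⟩ := g4 hfalse
            refine ⟨?_, gb⟩
            intro d' hd' hne
            rcases List.mem_cons.1 hd' with rfl | hd'
            · rcases (vtrue_iff rows cols src nsrc v' T hInvT p hpgood).1 hvis with h | h
              · exact g2 _ (hpstop ▸ h)
              · exact absurd (hpstop ▸ h) hne
            · exact ga d' hd' hne
          · rw [if_neg hvis]
            have hiffp := vtrue_iff rows cols src nsrc v' T hInvT p hpgood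
            have hpT : p ∉ T := fun h => hvis (hiffp.2 (Or.inl h))
            have hpn : p ≠ nsrc := fun h => hvis (hiffp.2 (Or.inr h))
            have hedge : pvStepRel maze rows cols nsrc (x, y) p :=
              ⟨d, hds d (List.mem_cons_self ..), hpstop.symm, hpn⟩
            obtain ⟨S₂, r1, r2, r3, r4, r5⟩ :=
              ih p.1 p.2 v' T hInvT hpgood (Or.inr ⟨hpT, hpn, hfT⟩)
            by_cases hret : (pvDfs maze rows cols d0 d1 f p.1 p.2 v').1 = true
            · rw [if_pos hret]
              refine ⟨S₂, r1, r2, ?_, ?_, ?_⟩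
              · intro c hc
                rcases r3 c hc with h | h
                · exact Or.inl h
                · exact Or.inr (Relation.ReflTransGen.head hedge h)
              · intro hfalse
                rw [hret] at hfalse
                simp at hfalse
              · intro _
                exact Relation.ReflTransGen.head hedge (r5 hret)
            · have hretf : (pvDfs maze rows cols d0 d1 f p.1 p.2 v').1 = false := by
                cases h : (pvDfs maze rows cols d0 d1 f p.1 p.2 v').1
                · rfl
                · exact absurd h hret
              rw [if_neg hret]
              obtain ⟨rpmem, rpne, rpstops, rclosed⟩ := r4 hretf
              have hlenT : T.length ≤ S₂.length :=
                nodup_subset_length T S₂ hInvT.2.1 r2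
              obtain ⟨S', g1, g2, g3, g4, g5⟩ :=
                ihds (fun d' hd' => hds d' (List.mem_cons_of_mem d hd'))
                  (pvDfs maze rows cols d0 d1 f p.1 p.2 v').2 S₂ r1 (r2 _ hxyT) (by omega)
              refine ⟨S', g1, fun c hc => g2 c (r2 c hc), ?_, ?_, ?_⟩
              · intro c hc
                rcases g3 c hc with h | h
                · rcases r3 c h with h' | h'
                  · exact Or.inl h'
                  · exact Or.inr (Relation.ReflTransGen.head hedge h')
                · exact Or.inr h
              · intro hfalse
                obtain ⟨ga, gb⟩ := g4 hfalse
                refine ⟨?_, ?_⟩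
                · intro d' hd' hne
                  rcases List.mem_cons.1 hd' with rfl | hd'
                  · exact g2 _ (hpstop ▸ rpmem)
                  · exact ga d' hd' hne
                · intro c hc hcT
                  by_cases hc2 : c ∈ S₂
                  · obtain ⟨hne, hcl⟩ := rclosed c hc2 hcT
                    exact ⟨hne, fun d' hd' hne' => g2 _ (hcl d' hd' hne')⟩
                  · exact gb c hc hc2
              · exact g5
      obtain ⟨S', g1, g2, g3, g4, g5⟩ :=
        dirs_spec pvDirs (fun d' hd' => hd') (pvVSet v x y) S₁ hInv1 hmem1 hfuel1
      refine ⟨S', g1, fun c hc => g2 c (hsub1 c hc), ?_, ?_, g5⟩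
      · intro c hc
        rcases g3 c hc with h | h
        · rcases hnew1 c h with h' | h'
          · exact Or.inl h'
          · exact Or.inr (h' ▸ Relation.ReflTransGen.refl)
        · exact Or.inr h
      · intro hfalse
        obtain ⟨ga, gb⟩ := g4 hfalse
        refine ⟨g2 _ hmem1, hxyne, fun d' hd' hne => ga d' hd' hne, ?_⟩
        intro c hc hcS
        by_cases hc1 : c ∈ S₁
        · rcases hnew1 c hc1 with h | h
          · exact absurd h hcS
          · subst h
            exact ⟨hxyne, fun d' hd' hne => ga d' hd' hne⟩
        · exact gb c hc hc1

-- the initial matrix (only the start marked) satisfies the invariant with S = [src]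
lemma init_minv (rows cols : Int) (src : Int × Int) (hws : WValid rows cols src) :
    MInv rows cols src (pvNorm rows cols src)
      (pvVSet (List.replicate rows.toNat (List.replicate cols.toNat false)) src.1 src.2) [src] := by
  refine ⟨vshape_vset_wrap rows cols _ (vshape_init rows cols) src hws,
    List.nodup_singleton _, List.mem_singleton_self _, ?_, ?_⟩
  · intro c hc
    rw [List.mem_singleton] at hc
    exact Or.inl hc
  · intro c hcg
    have hcw := good_wvalid rows cols src c hws hcg
    rw [vget_vset_wrap rows cols _ (vshape_init rows cols) src c hws hcw, vget_init]
    by_cases he : pvNorm rows cols c = pvNorm rows cols src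
    · rw [if_pos he]
      simp only [true_iff]
      rcases hcg with rfl | hcin
      · exact Or.inl (List.mem_singleton_self _)
      · exact Or.inr ((norm_of_inb rows cols c hcin) ▸ he)
    · rw [if_neg he]
      simp only [Bool.false_eq_true, false_iff]
      rintro (h | h)
      · rw [List.mem_singleton] at h
        exact he (by rw [h])
      · subst h
        exact he (norm_of_inb rows cols _ (norm_inb rows cols src hws))

-- ===== tying both ports to reachability =====

lemma hasPath_bfs_iff (maze : List (List Int)) (start destination : List Int)
    (hpre : Pre_hasPath_bfs maze start destination) :
    (hasPath_bfs maze start destination = true ↔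
      pvReach maze (maze.length : Int) ((PySem.List.pyGetD maze 0 []).length : Int)
        (pvNorm (maze.length : Int) ((PySem.List.pyGetD maze 0 []).length : Int)
          (PySem.List.pyGetD start 0 0, PySem.List.pyGetD start 1 0))
        (PySem.List.pyGetD start 0 0, PySem.List.pyGetD start 1 0)
        (PySem.List.pyGetD destination 0 0, PySem.List.pyGetD destination 1 0)) := by
  obtain ⟨h1, h2, hrows, hi0, hi1, hj0, hj1⟩ := hpre
  have hws : WValid (maze.length : Int) ((PySem.List.pyGetD maze 0 []).length : Int)
      (PySem.List.pyGetD start 0 0, PySem.List.pyGetD start 1 0) := ⟨hi0, hi1, hj0, hj1⟩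
  have hInv0 := init_minv (maze.length : Int) ((PySem.List.pyGetD maze 0 []).length : Int)
    (PySem.List.pyGetD start 0 0, PySem.List.pyGetD start 1 0) hws
  have hrt : ((maze.length : Int)).toNat = maze.length := by simp
  have hct : (((PySem.List.pyGetD maze 0 []).length : Int)).toNat
      = (PySem.List.pyGetD maze 0 []).length := by simp
  have hv0 : List.replicate maze.length (List.replicate (PySem.List.pyGetD maze 0 []).length false)
      = List.replicate ((maze.length : Int)).toNat
          (List.replicate (((PySem.List.pyGetD maze 0 []).length : Int)).toNat false) := by
    rw [hrt, hct]
  unfold hasPath_bfs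
  rw [hv0]
  apply pvBfsLoop_iff maze (maze.length : Int) ((PySem.List.pyGetD maze 0 []).length : Int)
    (PySem.List.pyGetD destination 0 0) (PySem.List.pyGetD destination 1 0)
    (PySem.List.pyGetD start 0 0, PySem.List.pyGetD start 1 0) _ hws rfl
    (maze.length * (PySem.List.pyGetD maze 0 []).length + 2)
    [(PySem.List.pyGetD start 0 0, PySem.List.pyGetD start 1 0)]
    _
    [(PySem.List.pyGetD start 0 0, PySem.List.pyGetD start 1 0)]
    hInv0
  · intro c hc
    rw [List.mem_singleton] at hc
    exact hc ▸ Relation.ReflTransGen.refl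
  · intro c hc
    exact hc
  · intro c hc hnc
    exact absurd hc hnc
  · simp only [List.length_singleton, hrt, hct]
    omega

lemma hasPath_bfs_alt_iff (maze : List (List Int)) (start destination : List Int)
    (hpre : Pre_hasPath_bfs maze start destination) :
    (hasPath_bfs_alt maze start destination = true ↔
      pvReach maze (maze.length : Int) ((PySem.List.pyGetD maze 0 []).length : Int)
        (pvNorm (maze.length : Int) ((PySem.List.pyGetD maze 0 []).length : Int)
          (PySem.List.pyGetD start 0 0, PySem.List.pyGetD start 1 0))
        (PySem.List.pyGetD start 0 0, PySem.List.pyGetD start 1 0)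
        (PySem.List.pyGetD destination 0 0, PySem.List.pyGetD destination 1 0)) := by
  obtain ⟨h1, h2, hrows, hi0, hi1, hj0, hj1⟩ := hpre
  have hws : WValid (maze.length : Int) ((PySem.List.pyGetD maze 0 []).length : Int)
      (PySem.List.pyGetD start 0 0, PySem.List.pyGetD start 1 0) := ⟨hi0, hi1, hj0, hj1⟩
  have hInv0 := init_minv (maze.length : Int) ((PySem.List.pyGetD maze 0 []).length : Int)
    (PySem.List.pyGetD start 0 0, PySem.List.pyGetD start 1 0) hws
  have hrt : ((maze.length : Int)).toNat = maze.length := by simp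
  have hct : (((PySem.List.pyGetD maze 0 []).length : Int)).toNat
      = (PySem.List.pyGetD maze 0 []).length := by simp
  have hv0 : List.replicate maze.length (List.replicate (PySem.List.pyGetD maze 0 []).length false)
      = List.replicate ((maze.length : Int)).toNat
          (List.replicate (((PySem.List.pyGetD maze 0 []).length : Int)).toNat false) := by
    rw [hrt, hct]
  rw [show hasPath_bfs_alt maze start destination
      = (bDfs maze (maze.length : Int) ((PySem.List.pyGetD maze 0 []).length : Int)
          (PySem.List.pyGetD destination 0 0, PySem.List.pyGetD destination 1 0)
          (maze.length * (PySem.List.pyGetD maze 0 []).length + 2)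
          (PySem.List.pyGetD start 0 0, PySem.List.pyGetD start 1 0)
          (pvVSet (List.replicate maze.length
            (List.replicate (PySem.List.pyGetD maze 0 []).length false))
            (PySem.List.pyGetD start 0 0) (PySem.List.pyGetD start 1 0))).1 from rfl,
    bDfs_eq', hv0]
  obtain ⟨S', g1, g2, g3, g4, g5⟩ := pvDfs_spec maze (maze.length : Int)
    ((PySem.List.pyGetD maze 0 []).length : Int)
    (PySem.List.pyGetD destination 0 0) (PySem.List.pyGetD destination 1 0)
    (PySem.List.pyGetD start 0 0, PySem.List.pyGetD start 1 0) _ hws rfl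
    (maze.length * (PySem.List.pyGetD maze 0 []).length + 2)
    (PySem.List.pyGetD start 0 0) (PySem.List.pyGetD start 1 0)
    _
    [(PySem.List.pyGetD start 0 0, PySem.List.pyGetD start 1 0)]
    hInv0 (Or.inl rfl)
    (Or.inl ⟨List.mem_singleton_self _, by simp only [List.length_singleton, hrt, hct]; omega⟩)
  constructor
  · intro htrue
    exact g5 htrue
  · intro hreach
    by_contra hfalse
    have hfalse' : (pvDfs maze (maze.length : Int) ((PySem.List.pyGetD maze 0 []).length : Int)
        (PySem.List.pyGetD destination 0 0) (PySem.List.pyGetD destination 1 0)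
        (maze.length * (PySem.List.pyGetD maze 0 []).length + 2)
        (PySem.List.pyGetD start 0 0) (PySem.List.pyGetD start 1 0)
        (pvVSet (List.replicate ((maze.length : Int)).toNat
          (List.replicate (((PySem.List.pyGetD maze 0 []).length : Int)).toNat false))
          (PySem.List.pyGetD start 0 0) (PySem.List.pyGetD start 1 0))).1 = false := by
      cases h : (pvDfs maze (maze.length : Int) ((PySem.List.pyGetD maze 0 []).length : Int)
          (PySem.List.pyGetD destination 0 0) (PySem.List.pyGetD destination 1 0)
          (maze.length * (PySem.List.pyGetD maze 0 []).length + 2)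
          (PySem.List.pyGetD start 0 0) (PySem.List.pyGetD start 1 0)
          (pvVSet (List.replicate ((maze.length : Int)).toNat
            (List.replicate (((PySem.List.pyGetD maze 0 []).length : Int)).toNat false))
            (PySem.List.pyGetD start 0 0) (PySem.List.pyGetD start 1 0))).1
      · rfl
      · exact absurd h hfalse
    obtain ⟨gmem, gne, gstops, gclosed⟩ := g4 hfalse'
    have hdest_mem := pvReach_closed maze (maze.length : Int)
      ((PySem.List.pyGetD maze 0 []).length : Int)
      (pvNorm (maze.length : Int) ((PySem.List.pyGetD maze 0 []).length : Int)
        (PySem.List.pyGetD start 0 0, PySem.List.pyGetD start 1 0))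
      (PySem.List.pyGetD start 0 0, PySem.List.pyGetD start 1 0)
      (fun c => c ∈ S') gmem
      (by
        intro c hc d hd hne
        by_cases hcS : c ∈ [((PySem.List.pyGetD start 0 0, PySem.List.pyGetD start 1 0) : Int × Int)]
        · rw [List.mem_singleton] at hcS
          subst hcS
          exact gstops d hd hne
        · exact (gclosed c hc hcS).2 d hd hne)
      _ hreach
    by_cases hdS : ((PySem.List.pyGetD destination 0 0, PySem.List.pyGetD destination 1 0) : Int × Int)
        ∈ [((PySem.List.pyGetD start 0 0, PySem.List.pyGetD start 1 0) : Int × Int)]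
    · rw [List.mem_singleton] at hdS
      exact gne hdS.symm
    · exact (gclosed _ hdest_mem hdS).1 rfl

-- ===== VERDICT (by name: the statement is the Claim_ definition above) =====
theorem hasPath_bfs_spec : Claim_equal_hasPath_bfs := by
  intro maze start destination _hdom hpre
  unfold Spec_hasPath_bfs
  have h1 := hasPath_bfs_iff maze start destination hpre
  have h2 := hasPath_bfs_alt_iff maze start destination hpre
  cases ha : hasPath_bfs maze start destination <;>
    cases hb : hasPath_bfs_alt maze start destination <;> simp_all
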